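-- pv_equiv track=rewrite | github.com/amyszczepanski/knitting_machine | app/brother_format.py | decode_row
-- ===== SOURCE A (Python) =====
-- from typing import Sequence
--
-- def _ceil4(n: int) -> int:
--     """Round n up to the nearest multiple of 4."""
--     r = n % 4
--     return n if r == 0 else n + (4 - r)
--
-- def nibbles_per_row(stitches: int) -> int:
--     """
--     Number of nibbles required to store one row of `stitches` stitches.
--     Stitch count is rounded up to the nearest multiple of 4 (nibble-aligned).
--     """
--     return _ceil4(stitches) // 4
--
-- def decode_row(nibble_list: Sequence[int], stitches: int) -> list[int]:
--     """
--     Decode a list of nibbles back into a list of `stitches` pixel values (0 or 1).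
--
--     This is the inverse of encode_row.
--     """
--     npr = nibbles_per_row(stitches)
--     if len(nibble_list) < npr:
--         raise ValueError(
--             f"Need at least {npr} nibbles to decode {stitches} stitches, "
--             f"got {len(nibble_list)}"
--         )
--     pixels: list[int] = []
--     remaining = stitches
--     for nib in nibble_list[:npr]:
--         for bit in range(4):
--             if remaining == 0:
--                 break
--             pixels.append((nib >> bit) & 1)
--             remaining -= 1
--     return pixels
-- ===== SOURCE B (Python) =====
-- def decode_row(nibble_list, stitches):
--     """
--     Decode a list of nibbles back into a list of `stitches` pixel values (0 or 1).
--
--     Flat single pass over output positions: pixel i lives at bit (i & 3) of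
--     nibble (i >> 2).
--     """
--     npr = -(-stitches // 4)  # ceil(stitches / 4)
--     if len(nibble_list) < npr:
--         raise ValueError(
--             f"Need at least {npr} nibbles to decode {stitches} stitches, "
--             f"got {len(nibble_list)}"
--         )
--     return [(nibble_list[i >> 2] >> (i & 3)) & 1 for i in range(stitches)]
-- ===== Notes on version B (the rewrite author's own statement) =====
-- stated objective: simpler
-- what changed: Replaces the nested nibble/bit loops with a remaining-counter and break by a single flat pass over output positions i in range(stitches), back-mapping each position to its nibble (i >> 2) and bit (i & 3), and computes npr by the ceiling-division idiom -(-stitches // 4).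
-- intended difference: For stitches <= -4 with more than (-stitches)//4 nibbles, A's negative npr makes the slice nibble_list[:npr] drop trailing elements and the never-zero negative remaining counter decodes all remaining nibbles to a nonempty junk list (e.g. [1,1,0,0] on ([3,5],-5)); B returns [] there, the intended value for a nonpositive stitch count. — e.g. on decode_row([3, 5], -5): A returns [1, 1, 0, 0], B returns []
import Mathlib
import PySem

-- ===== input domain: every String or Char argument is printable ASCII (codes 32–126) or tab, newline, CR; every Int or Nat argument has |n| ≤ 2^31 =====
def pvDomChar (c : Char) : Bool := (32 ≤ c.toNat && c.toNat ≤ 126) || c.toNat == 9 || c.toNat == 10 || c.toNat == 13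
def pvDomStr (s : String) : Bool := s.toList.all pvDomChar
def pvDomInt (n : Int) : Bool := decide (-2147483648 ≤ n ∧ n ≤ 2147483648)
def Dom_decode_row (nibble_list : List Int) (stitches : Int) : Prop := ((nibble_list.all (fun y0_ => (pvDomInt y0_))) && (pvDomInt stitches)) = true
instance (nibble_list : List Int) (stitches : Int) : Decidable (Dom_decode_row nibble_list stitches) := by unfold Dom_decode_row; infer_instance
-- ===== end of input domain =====

-- B replaces A's nested nibble/bit loops (remaining counter + break) by one flat pass over
-- output positions with index back-mapping; objective: simpler.

-- ===== PORT A =====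
def pv_ceil4 (n : Int) : Int :=
  let r := PySem.Int.mod n 4
  if r = 0 then n else n + (4 - r)

def nibbles_per_row (stitches : Int) : Int :=
  PySem.Int.floordiv (pv_ceil4 stitches) 4

def pvInnerA (nib : Int) (st : List Int × Int) : List Int → List Int × Int
  | [] => st
  | bit :: rest =>
    if st.2 = 0 then st
    else pvInnerA nib (st.1 ++ [PySem.Int.band (nib >>> bit.toNat) 1], st.2 - 1) rest

def decode_row (nibble_list : List Int) (stitches : Int) : List Int :=
  let npr := nibbles_per_row stitches
  -- Python raises ValueError when len(nibble_list) < npr; Pre_decode_row excludes exactly those inputs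
  ((PySem.List.slice nibble_list none (some npr)).foldl
    (fun st nib => pvInnerA nib st (PySem.List.pyRange 0 4 1)) ([], stitches)).1

-- ===== PORT B =====
def decode_row_alt (nibble_list : List Int) (stitches : Int) : List Int :=
  let _npr := -(PySem.Int.floordiv (-stitches) 4)
  -- Python raises ValueError when len(nibble_list) < _npr; Pre_decode_row excludes exactly those inputs
  (PySem.List.pyRange 0 stitches 1).map (fun (i : Int) =>
    PySem.Int.band ((PySem.List.pyGetD nibble_list (i >>> (2 : Nat)) 0) >>> (PySem.Int.band i 3).toNat) 1)

-- ===== PRECONDITION & SPEC =====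
-- A raises ValueError exactly when len(nibble_list) < nibbles_per_row(stitches), i.e. 4*len < stitches.
def Pre_decode_row (nibble_list : List Int) (stitches : Int) : Prop :=
  stitches ≤ 4 * (nibble_list.length : Int)
instance (nibble_list : List Int) (stitches : Int) : Decidable (Pre_decode_row nibble_list stitches) := by
  unfold Pre_decode_row; infer_instance

def pvWitness_decode_row : List Int × Int := ([9, 3], 7)

-- On stitches ≤ -4 with more than (-stitches)//4 nibbles, A's negative npr slices off trailing
-- nibbles and its never-zero negative remaining counter decodes all the rest into a nonempty junk
-- list; B returns [], the intended value for a nonpositive stitch count.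
def D_decode_row (nibble_list : List Int) (stitches : Int) : Prop :=
  stitches ≤ -4 ∧ (-stitches) / 4 < (nibble_list.length : Int)
instance (nibble_list : List Int) (stitches : Int) : Decidable (D_decode_row nibble_list stitches) := by
  unfold D_decode_row; infer_instance

def Spec_decode_row (nibble_list : List Int) (stitches : Int) (out : List Int) : Prop :=
  ¬ D_decode_row nibble_list stitches → out = decode_row_alt nibble_list stitches
instance (nibble_list : List Int) (stitches : Int) (out : List Int) : Decidable (Spec_decode_row nibble_list stitches out) := by
  unfold Spec_decode_row; infer_instance

def pvDiffWitness_decode_row : List Int × Int := ([3, 5], -5)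
def pvDiffWitnessOut_decode_row : (List Int) × (List Int) := ([1, 1, 0, 0], [])

-- ===== CLAIM (what is proved, stated in full; the proofs are below) =====
def Claim_unchanged_decode_row : Prop := ∀ (nibble_list : List Int) (stitches : Int), Dom_decode_row nibble_list stitches → Pre_decode_row nibble_list stitches → Spec_decode_row nibble_list stitches (decode_row nibble_list stitches)
def Claim_changed_decode_row : Prop := Dom_decode_row (pvDiffWitness_decode_row.1) (pvDiffWitness_decode_row.2) ∧ Pre_decode_row (pvDiffWitness_decode_row.1) (pvDiffWitness_decode_row.2) ∧ D_decode_row (pvDiffWitness_decode_row.1) (pvDiffWitness_decode_row.2) ∧ decode_row (pvDiffWitness_decode_row.1) (pvDiffWitness_decode_row.2) = pvDiffWitnessOut_decode_row.1 ∧ decode_row_alt (pvDiffWitness_decode_row.1) (pvDiffWitness_decode_row.2) = pvDiffWitnessOut_decode_row.2 ∧ pvDiffWitnessOut_decode_row.1 ≠ pvDiffWitnessOut_decode_row.2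
def Claim_exact_decode_row : Prop := ∀ (nibble_list : List Int) (stitches : Int), Dom_decode_row nibble_list stitches → Pre_decode_row nibble_list stitches → D_decode_row nibble_list stitches → decode_row nibble_list stitches ≠ decode_row_alt nibble_list stitches

-- ===== LEMMAS AND PROOFS =====

def pvBit (nib : Int) (k : Nat) : Int := PySem.Int.band (nib >>> (k % 4)) 1
def pvSpec (nibs : List Int) (n : Nat) : List Int :=
  (List.range n).map (fun k => pvBit (nibs.getD (k / 4) 0) k)
def pvStep (st : List Int × Int) (nib : Int) : List Int × Int :=
  pvInnerA nib st (PySem.List.pyRange 0 4 1)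

lemma pvInner_spec (nib : Int) (px : List Int) (r : Int) :
    pvStep (px, r) nib =
      if r = 0 then (px, r)
      else if r = 1 then (px ++ [pvBit nib 0], 0)
      else if r = 2 then (px ++ [pvBit nib 0, pvBit nib 1], 0)
      else if r = 3 then (px ++ [pvBit nib 0, pvBit nib 1, pvBit nib 2], 0)
      else (px ++ [pvBit nib 0, pvBit nib 1, pvBit nib 2, pvBit nib 3], r - 4) := by
  have h4 : PySem.List.pyRange 0 4 1 = [0,1,2,3] := by decide
  simp only [pvStep, h4, pvInnerA, pvBit]
  split_ifs <;> simp_all <;> omega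

lemma pvBit_add4 (nib : Int) (k : Nat) : pvBit nib (4 + k) = pvBit nib k := by
  simp [pvBit, Nat.add_mod_left]

lemma pvSpec_cons (nib : Int) (rest : List Int) (m : Nat) :
    pvSpec (nib :: rest) (4 + m) =
      [pvBit nib 0, pvBit nib 1, pvBit nib 2, pvBit nib 3] ++ pvSpec rest m := by
  simp only [pvSpec, List.range_add, List.map_append, List.map_map]
  congr 1
  refine List.map_congr_left fun a _ => ?_
  simp only [Function.comp_apply]
  rw [Nat.add_comm 4 a, Nat.add_div_right a (by omega : 0 < 4), List.getD_cons_succ,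
    Nat.add_comm a 4, pvBit_add4]

lemma pvFoldA_zero (nibs : List Int) (px : List Int) :
    nibs.foldl pvStep (px, (0 : Int)) = (px, 0) := by
  induction nibs generalizing px with
  | nil => rfl
  | cons nib rest ih => rw [List.foldl_cons, pvInner_spec]; simp [ih]

lemma pvFoldA_spec (nibs : List Int) (px : List Int) (r : Nat) :
    nibs.foldl pvStep (px, (r : Int)) =
      (px ++ pvSpec nibs (min r (4 * nibs.length)), ((r - 4 * nibs.length : Nat) : Int)) := by
  induction nibs generalizing px r with
  | nil => simp [pvSpec]
  | cons nib rest ih =>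
    rw [List.foldl_cons, pvInner_spec]
    rcases Nat.lt_or_ge r 4 with hr | hr
    · interval_cases r
      · simp [pvFoldA_zero, pvSpec]
      · have h1 : min 1 (4 * (rest.length + 1)) = 1 := by omega
        have z1 : 1 - 4 * (rest.length + 1) = 0 := by omega
        simp [pvFoldA_zero, pvSpec, h1, z1, List.range_succ]
      · have h1 : min 2 (4 * (rest.length + 1)) = 2 := by omega
        have z1 : 2 - 4 * (rest.length + 1) = 0 := by omega
        simp [pvFoldA_zero, pvSpec, h1, z1, List.range_succ]
      · have h1 : min 3 (4 * (rest.length + 1)) = 3 := by omega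
        have z1 : 3 - 4 * (rest.length + 1) = 0 := by omega
        simp [pvFoldA_zero, pvSpec, h1, z1, List.range_succ]
    · have h4 : ¬((r:Int) = 0) ∧ ¬((r:Int) = 1) ∧ ¬((r:Int) = 2) ∧ ¬((r:Int) = 3) := by
        omega
      simp only [h4.1, h4.2.1, h4.2.2.1, h4.2.2.2, if_false]
      have hcast : (r : Int) - 4 = ((r - 4 : Nat) : Int) := by omega
      have hmin : min r (4 * (nib :: rest).length) = 4 + min (r - 4) (4 * rest.length) := by
        simp [List.length_cons]; omega
      rw [hcast, ih, hmin, pvSpec_cons]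
      simp only [List.append_assoc, List.length_cons]
      congr 2
      omega
lemma pvFoldA_neg (nibs : List Int) (px : List Int) (r : Int) (hr : r < 0) :
    (nibs.foldl pvStep (px, r)).1.length = px.length + 4 * nibs.length := by
  induction nibs generalizing px r with
  | nil => simp
  | cons nib rest ih =>
    rw [List.foldl_cons, pvInner_spec]
    have h0 : ¬(r = 0) := by omega
    have h1 : ¬(r = 1) := by omega
    have h2 : ¬(r = 2) := by omega
    have h3 : ¬(r = 3) := by omega
    simp only [h0, h1, h2, h3, if_false]
    rw [ih _ _ (by omega)]
    simp
    omega

lemma pvNpr_char (s : Int) : nibbles_per_row s = -((-s) / 4) := by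
  have hm : PySem.Int.mod s 4 = s % 4 := PySem.Int.mod_eq_emod_of_pos (by norm_num)
  have hd : ∀ a : Int, PySem.Int.floordiv a 4 = a / 4 := fun a =>
    PySem.Int.floordiv_eq_ediv_of_pos (by norm_num)
  unfold nibbles_per_row pv_ceil4
  simp only [hm, hd]
  split_ifs with h <;> omega
lemma pvApos (nibs : List Int) (k : Nat) :
    PySem.Int.band ((PySem.List.pyGetD nibs ((k : Int) >>> (2 : Nat)) 0) >>>
        (PySem.Int.band (k : Int) 3).toNat) 1 = pvBit (nibs.getD (k / 4) 0) k := by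
  have hsh : ((k : Int) >>> (2 : Nat)) = ((k >>> 2 : Nat) : Int) := rfl
  have hmod : k &&& 3 = k % 4 := by
    have := Nat.and_two_pow_sub_one_eq_mod k 2
    norm_num at this
    exact this
  have hband : PySem.Int.band (k : Int) 3 = ((k % 4 : Nat) : Int) := by
    rw [← hmod]
    exact_mod_cast PySem.Int.band_natCast k 3
  rw [hsh, hband, PySem.List.pyGetD_natCast, Nat.shiftRight_eq_div_pow, Int.toNat_natCast]
  norm_num [pvBit]

lemma pvAlt_spec (nibs : List Int) (n : Nat) :
    decode_row_alt nibs (n : Int) = pvSpec nibs n := by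
  unfold decode_row_alt
  rw [PySem.List.pyRange_zero_natCast, List.map_map]
  exact List.map_congr_left fun k _ => pvApos nibs k
lemma pvAlt_nonpos (nibs : List Int) (s : Int) (hs : s ≤ 0) :
    decode_row_alt nibs s = [] := by
  unfold decode_row_alt
  rw [PySem.List.pyRange_one_eq_nil hs]
  rfl

lemma pvSpec_take (nibs : List Int) (q n : Nat) (h : n ≤ 4 * q) :
    pvSpec (nibs.take q) n = pvSpec nibs n := by
  unfold pvSpec
  refine List.map_congr_left fun k hk => ?_
  have hk' : k / 4 < q := by
    have := List.mem_range.mp hk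
    omega
  unfold List.getD
  rw [List.getElem?_take_of_lt hk']

lemma pvA_nonneg (nibs : List Int) (n : Nat)
    (hpre : (n : Int) ≤ 4 * (nibs.length : Int)) :
    decode_row nibs (n : Int) = pvSpec nibs n := by
  have hq : nibbles_per_row (n : Int) = (((n + 3) / 4 : Nat) : Int) := by
    rw [pvNpr_char]; omega
  have hqlen : (n + 3) / 4 ≤ nibs.length := by omega
  show ((PySem.List.slice nibs none (some (nibbles_per_row (n : Int)))).foldl pvStep
    ([], (n : Int))).1 = _
  rw [hq, PySem.List.slice_to_natCast, pvFoldA_spec]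
  have hlen : (nibs.take ((n + 3) / 4)).length = (n + 3) / 4 := by
    simp [List.length_take]; omega
  rw [hlen]
  have hmin : min n (4 * ((n + 3) / 4)) = n := by omega
  rw [hmin, pvSpec_take nibs _ n (by omega)]
  simp

lemma pvA_nil (nibs : List Int) (s : Int) (hs : s < 0)
    (hnd : ¬ D_decode_row nibs s) :
    decode_row nibs s = [] := by
  show ((PySem.List.slice nibs none (some (nibbles_per_row s))).foldl pvStep
    ([], s)).1 = _
  have hsl : PySem.List.slice nibs none (some (nibbles_per_row s)) = [] := by
    rw [pvNpr_char]
    rcases lt_or_ge s (-3) with h4 | h4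
    · -- s ≤ -4 : npr = -k with nibs.length ≤ k
      have hk : ¬ (s ≤ -4 ∧ (-s) / 4 < (nibs.length : Int)) := hnd
      have hlen : (nibs.length : Int) ≤ (-s) / 4 := by
        rcases lt_or_ge ((-s) / 4) (nibs.length : Int) with h | h
        · exact absurd ⟨by omega, h⟩ hk
        · exact h
      set k : Nat := ((-s) / 4).toNat with hkdef
      have hk0 : 0 < k := by omega
      have hcast : -((-s) / 4) = -(k : Int) := by omega
      rw [hcast, PySem.List.slice_to_neg_natCast nibs k hk0]
      have : nibs.length - k = 0 := by omega
      rw [this, List.take_zero]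
    · -- -3 ≤ s < 0 : npr = 0
      have : -((-s) / 4) = (0 : Int) := by omega
      rw [this]
      have h0 : PySem.List.slice nibs none (some ((0:Nat) : Int)) = nibs.take 0 :=
        PySem.List.slice_to_natCast nibs 0
      simpa using h0
  rw [hsl]
  rfl
-- ===== VERDICT (by name: the statement is the Claim_ definition above) =====
theorem decode_row_spec : Claim_unchanged_decode_row := by
  intro nibs s _ hpre hnd
  rcases lt_or_ge s 0 with hs | hs
  · rw [pvA_nil nibs s hs hnd, pvAlt_nonpos nibs s (le_of_lt hs)]
  · obtain ⟨n, rfl⟩ : ∃ n : Nat, s = (n : Int) := ⟨s.toNat, by omega⟩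
    rw [pvA_nonneg nibs n (show (n : Int) ≤ 4 * (nibs.length : Int) from hpre), pvAlt_spec]

theorem decode_row_changed : Claim_changed_decode_row := by
  unfold Claim_changed_decode_row; decide

theorem decode_row_tight : Claim_exact_decode_row := by
  intro nibs s _ _ hd
  obtain ⟨hs4, hlen⟩ := hd
  rw [pvAlt_nonpos nibs s (by omega)]
  set k : Nat := ((-s) / 4).toNat with hk
  have hk0 : 0 < k := by omega
  have hkl : k < nibs.length := by omega
  have hsl : PySem.List.slice nibs none (some (nibbles_per_row s)) = nibs.take (nibs.length - k) := by
    rw [pvNpr_char]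
    have hcast : -((-s) / 4) = -(k : Int) := by omega
    rw [hcast]
    exact PySem.List.slice_to_neg_natCast nibs k hk0
  have hA : (decode_row nibs s).length = 4 * (nibs.length - k) := by
    show (((PySem.List.slice nibs none (some (nibbles_per_row s))).foldl pvStep ([], s)).1).length = _
    rw [hsl, pvFoldA_neg _ _ s (by omega)]
    simp [List.length_take]
  intro h
  rw [h] at hA
  simp at hA
  omega
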